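-- pv_equiv track=rewrite | github.com/Shafinkhandaker/CSE221-Labs | Lab_05/task2.py | compute
-- ===== SOURCE A (Python) =====
-- def compute(lst, m):
--     cur = 0
--     store = [0 for _ in range(m)]
--     ans = 0
--     for task in lst:
--         for j in range(len(store)):
--             if task[1] >= store[j]:
--                 store[j] = task[0]
--                 ans += 1
--                 break
--     return ans
-- ===== SOURCE B (Python) =====
-- def compute(lst, m):
--     # Assign slot by slot: one pass per slot greedily takes the tasks that fit it
--     # and cascades the rejected tasks to the next slot; stop early when none remain.
--     remaining = lst
--     ans = 0
--     for _ in range(m if m > 0 else 0):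
--         if not remaining:
--             break
--         cur = 0
--         nxt = []
--         for task in remaining:
--             if task[1] >= cur:
--                 cur = task[0]
--                 ans += 1
--             else:
--                 nxt.append(task)
--         remaining = nxt
--     return ans
-- ===== Notes on version B (the rewrite author's own statement) =====
-- stated objective: alternative
-- what changed: B transposes the loops: instead of A's per-task left-to-right scan over all m slots, B makes one greedy pass per slot that takes the tasks fitting that slot and cascades the rejected tasks to the next slot, stopping early when no tasks remain.
import Mathlib
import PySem

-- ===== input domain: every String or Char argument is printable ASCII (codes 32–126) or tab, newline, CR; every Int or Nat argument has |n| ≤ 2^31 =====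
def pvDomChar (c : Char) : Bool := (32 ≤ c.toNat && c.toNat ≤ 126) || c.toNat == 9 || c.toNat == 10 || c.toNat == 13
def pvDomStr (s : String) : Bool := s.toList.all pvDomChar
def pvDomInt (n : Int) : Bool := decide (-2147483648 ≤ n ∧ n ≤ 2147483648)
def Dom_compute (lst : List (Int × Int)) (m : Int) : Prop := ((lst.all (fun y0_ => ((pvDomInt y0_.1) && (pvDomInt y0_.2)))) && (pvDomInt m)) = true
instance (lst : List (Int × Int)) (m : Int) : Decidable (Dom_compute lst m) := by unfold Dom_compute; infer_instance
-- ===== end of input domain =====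

-- B replaces A's per-task left-to-right scan of all m slots by a slot-by-slot cascade:
-- one pass per slot greedily takes the tasks that fit it and hands the rejected tasks
-- to the next slot, stopping early when no tasks remain (objective: alternative).

-- ===== PORT A =====
-- inner loop: for j in range(len(store)): if task[1] >= store[j]: store[j]=task[0]; ans+=1; break
-- (the scanned prefix is kept in an accumulator so the scan is a tail recursion)
def computeInnerGo (v d : Int) : List Int → List Int → (List Int × Int)
  | acc, [] => (acc.reverse, 0)
  | acc, s :: st =>
      if d ≥ s then (List.reverseAux acc (v :: st), 1)
      else computeInnerGo v d (s :: acc) st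

def computeInner (v d : Int) (store : List Int) : List Int × Int :=
  computeInnerGo v d [] store

-- one iteration of the task loop: thread (store, ans)
def stepA (acc : List Int × Int) (task : Int × Int) : List Int × Int :=
  let r := computeInner task.1 task.2 acc.1
  (r.1, acc.2 + r.2)

def compute (lst : List (Int × Int)) (m : Int) : Int :=
  -- store = [0 for _ in range(m)]
  let store : List Int := List.replicate m.toNat 0
  (lst.foldl stepA (store, 0)).2

-- ===== PORT B =====
-- one pass over `remaining` for one slot (cur, accumulated nxt, count): returns (nxt, number taken)
def passGo (cur : Int) (acc : List (Int × Int)) (cnt : Int) : List (Int × Int) → (List (Int × Int) × Int)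
  | [] => (acc.reverse, cnt)
  | t :: rest =>
      if t.2 ≥ cur then passGo t.1 acc (cnt + 1) rest
      else passGo cur (t :: acc) cnt rest

def passB (lst : List (Int × Int)) : List (Int × Int) × Int :=
  passGo 0 [] 0 lst

-- for _ in range(max(m,0)): if not remaining: break; one pass per slot
def outerB : Nat → List (Int × Int) → Int → Int
  | 0, _, ans => ans
  | Nat.succ k, remaining, ans =>
      if remaining = [] then ans
      else
        let r := passB remaining
        outerB k r.1 (ans + r.2)

def compute_alt (lst : List (Int × Int)) (m : Int) : Int :=
  outerB m.toNat lst 0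

-- ===== PRECONDITION & SPEC =====
def Spec_compute (lst : List (Int × Int)) (m : Int) (out : Int) : Prop := out = compute_alt lst m
instance (lst : List (Int × Int)) (m : Int) (out : Int) : Decidable (Spec_compute lst m out) := by unfold Spec_compute; infer_instance

-- ===== CLAIM (what is proved, stated in full; the proofs are below) =====
def Claim_equal_compute : Prop := ∀ (lst : List (Int × Int)) (m : Int), Dom_compute lst m → Spec_compute lst m (compute lst m)

-- ===== LEMMAS AND PROOFS =====

-- the inner scan, written as plain structural recursion (proof-side view of computeInner)
def simpleInner (v d : Int) : List Int → (List Int × Int)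
  | [] => ([], 0)
  | s :: st =>
      if d ≥ s then (v :: st, 1)
      else
        let r := simpleInner v d st
        (s :: r.1, r.2)

theorem computeInnerGo_simple (v d : Int) (l acc : List Int) :
    computeInnerGo v d acc l
      = (List.reverseAux acc (simpleInner v d l).1, (simpleInner v d l).2) := by
  induction l generalizing acc with
  | nil => simp [computeInnerGo, simpleInner]
  | cons s st ih =>
      simp only [computeInnerGo, simpleInner]
      split_ifs
      · rfl
      · rw [ih]; rfl

theorem computeInner_eq (v d : Int) (l : List Int) :
    computeInner v d l = simpleInner v d l := by
  rw [computeInner, computeInnerGo_simple]; rfl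

-- A's whole task loop as a recursion: (final store, total count)
def runA : List (Int × Int) → List Int → (List Int × Int)
  | [], st => (st, 0)
  | t :: rest, st =>
      let r := simpleInner t.1 t.2 st
      let q := runA rest r.1
      (q.1, r.2 + q.2)

theorem foldl_runA (lst : List (Int × Int)) (st : List Int) (a : Int) :
    lst.foldl stepA (st, a) = ((runA lst st).1, a + (runA lst st).2) := by
  induction lst generalizing st a with
  | nil => simp [runA]
  | cons t rest ih =>
      rw [List.foldl_cons, show stepA (st, a) t
            = ((computeInner t.1 t.2 st).1, a + (computeInner t.1 t.2 st).2) from rfl,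
          ih, computeInner_eq]
      simp only [runA]
      ring_nf

-- the chain for one slot: (final cur, rejected tasks, count taken)
def chain3 : List (Int × Int) → Int → (Int × List (Int × Int) × Int)
  | [], s => (s, [], 0)
  | t :: rest, s =>
      if t.2 ≥ s then
        let r := chain3 rest t.1
        (r.1, r.2.1, r.2.2 + 1)
      else
        let r := chain3 rest s
        (r.1, t :: r.2.1, r.2.2)

theorem passGo_chain3 (lst : List (Int × Int)) (s : Int) (acc : List (Int × Int)) (c : Int) :
    passGo s acc c lst
      = (List.reverseAux acc (chain3 lst s).2.1, c + (chain3 lst s).2.2) := by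
  induction lst generalizing s acc c with
  | nil => simp [passGo, chain3, List.reverseAux]
  | cons t rest ih =>
      simp only [passGo, chain3]
      split_ifs
      · rw [ih]; ring_nf
      · rw [ih]; simp [List.reverseAux]

theorem passB_chain3 (lst : List (Int × Int)) :
    passB lst = ((chain3 lst 0).2.1, (chain3 lst 0).2.2) := by
  rw [passB, passGo_chain3]; simp [List.reverseAux]

-- empty store: nothing is ever assigned
theorem runA_nil (lst : List (Int × Int)) : runA lst [] = ([], 0) := by
  induction lst with
  | nil => rfl
  | cons t rest ih => simp [runA, simpleInner, ih]

-- decompose the head slot: A on (s :: st) = the chain on s, then A of the rejects on st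
theorem runA_cons (lst : List (Int × Int)) (s : Int) (st : List Int) :
    runA lst (s :: st)
      = ((chain3 lst s).1 :: (runA (chain3 lst s).2.1 st).1,
         (chain3 lst s).2.2 + (runA (chain3 lst s).2.1 st).2) := by
  induction lst generalizing s st with
  | nil => simp [runA, chain3]
  | cons t rest ih =>
      by_cases h : t.2 ≥ s
      · simp only [runA, simpleInner, if_pos h, chain3]
        rw [ih]
        ring_nf
      · simp only [runA, simpleInner, if_neg h, chain3]
        rw [ih]
        ring_nf

theorem outerB_runA (n : Nat) (lst : List (Int × Int)) (a : Int) :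
    outerB n lst a = a + (runA lst (List.replicate n 0)).2 := by
  induction n generalizing lst a with
  | zero => simp [outerB, runA_nil]
  | succ k ih =>
      simp only [outerB, List.replicate]
      by_cases h : lst = []
      · subst h; simp [runA]
      · rw [if_neg h, passB_chain3, ih, runA_cons]
        ring_nf

-- ===== VERDICT (by name: the statement is the Claim_ definition above) =====
theorem compute_spec : Claim_equal_compute := by
  intro lst m _
  show (lst.foldl stepA (List.replicate m.toNat 0, 0)).2 = outerB m.toNat lst 0
  rw [foldl_runA, outerB_runA]
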